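-- pv_equiv track=rewrite | github.com/Cloufield/CTGCatalog | src/process_major_databases.py | _group_by_nav_listing
-- ===== SOURCE A (Python) =====
-- _COUNTRY_ORDER = [
--     "international",
--     "china",
--     "japan",
--     "republic_of_korea",
--     "united_states",
--     "united_kingdom_and_europe",
--     "germany",
--     "australia",
--     "canada",
-- ]
--
-- _FOLDER_TO_CONTINENT: dict[str, str] = {
--     "china": "ASIA",
--     "japan": "ASIA",
--     "republic_of_korea": "ASIA",
--     "united_states": "AMERICA",
--     "canada": "AMERICA",
--     "united_kingdom_and_europe": "EUROPE",
--     "germany": "EUROPE",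
--     "australia": "OCEANIA",
-- }
--
-- def _nav_key_for_folder(slug: str) -> str:
--     if slug == "international":
--         return "International"
--     cont = _FOLDER_TO_CONTINENT.get(slug)
--     if cont is None:
--         raise ValueError(
--             f"json/databases/{slug}/ is not mapped to a continent; add it to "
--             "_FOLDER_TO_CONTINENT in process_major_databases.py (or use folder "
--             "`international` for non-regional hubs)."
--         )
--     return cont
--
-- def _sort_merged_items(items: list[tuple[str, dict]]) -> list[tuple[str, dict]]:
--     def country_rank(folder: str) -> int:
--         try:
--             return _COUNTRY_ORDER.index(folder)
--         except ValueError: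
--             return 999
--
--     def sort_key(item: tuple[str, dict]) -> tuple[int, int, str]:
--         folder, rec = item
--         order = rec.get("DISPLAY_ORDER")
--         try:
--             on = int(order) if order is not None else 0
--         except (TypeError, ValueError):
--             on = 0
--         nm = str(rec.get("NAME") or "")
--         return (country_rank(folder), on, nm.casefold())
--
--     return sorted(items, key=sort_key)
--
-- def _group_by_nav_listing(
--     by_country: dict[str, list[dict]],
-- ) -> dict[str, list[tuple[str, dict]]]:
--     groups: dict[str, list[tuple[str, dict]]] = {}
--     for folder_slug, rows in by_country.items():
--         if not rows:
--             continue
--         nav_key = _nav_key_for_folder(folder_slug)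
--         bucket = groups.setdefault(nav_key, [])
--         for rec in rows:
--             bucket.append((folder_slug, rec))
--     for k in list(groups):
--         groups[k] = _sort_merged_items(groups[k])
--     return groups
-- ===== SOURCE B (Python) =====
-- _COUNTRY_ORDER = [
--     "international",
--     "china",
--     "japan",
--     "republic_of_korea",
--     "united_states",
--     "united_kingdom_and_europe",
--     "germany",
--     "australia",
--     "canada",
-- ]
--
-- _FOLDER_TO_CONTINENT = {
--     "china": "ASIA",
--     "japan": "ASIA",
--     "republic_of_korea": "ASIA",
--     "united_states": "AMERICA",
--     "canada": "AMERICA",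
--     "united_kingdom_and_europe": "EUROPE",
--     "germany": "EUROPE",
--     "australia": "OCEANIA",
-- }
--
--
-- def _group_by_nav_listing(by_country):
--     # One pass, no batch sort: each (folder, rec) pair is placed at its final
--     # position in its continent bucket as it arrives, by binary search for the
--     # rightmost insertion point (so equal keys keep arrival order, exactly like
--     # a stable sorted() would leave them).
--     groups = {}  # nav_key -> list of (sort_key, folder_slug, rec), kept sorted by sort_key
--     for folder_slug, rows in by_country.items():
--         if not rows:
--             continue
--         if folder_slug == "international":
--             nav_key = "International"
--         else:
--             nav_key = _FOLDER_TO_CONTINENT.get(folder_slug)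
--             if nav_key is None:
--                 raise ValueError(
--                     f"json/databases/{folder_slug}/ is not mapped to a continent; add it to "
--                     "_FOLDER_TO_CONTINENT in process_major_databases.py (or use folder "
--                     "`international` for non-regional hubs)."
--                 )
--         try:
--             rank = _COUNTRY_ORDER.index(folder_slug)
--         except ValueError:
--             rank = 999
--         bucket = groups.setdefault(nav_key, [])
--         for rec in rows:
--             order = rec.get("DISPLAY_ORDER")
--             try:
--                 on = int(order) if order is not None else 0
--             except (TypeError, ValueError):
--                 on = 0
--             nm = str(rec.get("NAME") or "")
--             k = (rank, on, nm.casefold())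
--             lo, hi = 0, len(bucket)
--             while lo < hi:
--                 mid = (lo + hi) // 2
--                 if k < bucket[mid][0]:
--                     hi = mid
--                 else:
--                     lo = mid + 1
--             bucket.insert(lo, (k, folder_slug, rec))
--     return {nav: [(f, rec) for _, f, rec in b] for nav, b in groups.items()}
-- ===== Notes on version B (the rewrite author's own statement) =====
-- stated objective: alternative
-- what changed: B drops A's two-phase collect-then-batch-sort (append every row to its continent bucket, then a second pass re-sorting each bucket with sorted()): in a single pass it places each (folder, rec) pair directly at its final position in the bucket via a hand-written rightmost binary search + insert, so the buckets are always sorted and no second pass exists.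
import Mathlib
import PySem

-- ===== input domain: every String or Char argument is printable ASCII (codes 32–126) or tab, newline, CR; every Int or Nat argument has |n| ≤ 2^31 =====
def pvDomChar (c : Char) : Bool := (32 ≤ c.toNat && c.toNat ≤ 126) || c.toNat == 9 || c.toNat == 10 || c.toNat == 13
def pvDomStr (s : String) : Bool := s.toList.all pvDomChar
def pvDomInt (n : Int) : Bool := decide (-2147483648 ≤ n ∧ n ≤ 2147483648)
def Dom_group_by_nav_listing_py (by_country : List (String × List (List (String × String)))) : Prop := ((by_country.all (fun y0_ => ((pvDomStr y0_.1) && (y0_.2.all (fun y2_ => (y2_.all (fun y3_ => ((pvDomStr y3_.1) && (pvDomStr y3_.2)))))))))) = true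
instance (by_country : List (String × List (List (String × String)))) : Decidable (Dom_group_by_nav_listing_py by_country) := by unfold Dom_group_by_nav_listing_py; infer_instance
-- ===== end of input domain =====

-- B replaces A's collect-then-batch-sort-every-bucket (two passes over the groups dict) by a single
-- pass that keeps each continent bucket sorted as it is built, via a hand-written rightmost binary
-- search + positional insert (objective: alternative algorithm; not claimed faster).

-- ===== PORT A =====
abbrev pvRec := List (String × String)
abbrev pvItem := String × pvRec

def pvCountryOrder : List String :=
  ["international", "china", "japan", "republic_of_korea", "united_states",
   "united_kingdom_and_europe", "germany", "australia", "canada"]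

def pvContinent : PySem.Dict String String :=
  PySem.Dict.mk
    [("china", "ASIA"), ("japan", "ASIA"), ("republic_of_korea", "ASIA"),
     ("united_states", "AMERICA"), ("canada", "AMERICA"),
     ("united_kingdom_and_europe", "EUROPE"), ("germany", "EUROPE"),
     ("australia", "OCEANIA")]

-- _nav_key_for_folder; where Python raises ValueError (unmapped slug) the port returns "",
-- those inputs are excluded by Pre_group_by_nav_listing_py.
def pvNavKeyD (slug : String) : String :=
  if slug == "international" then "International"
  else (pvContinent.get? slug).getD ""

-- country_rank: _COUNTRY_ORDER.index(folder), ValueError -> 999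
def pvCountryRank (folder : String) : Int :=
  match PySem.List.index? pvCountryOrder folder with
  | some i => (i : Int)
  | none => 999

-- int(rec.get("DISPLAY_ORDER")) with None -> 0 and ValueError -> 0
def pvDisplayOrderInt (rec : pvRec) : Int :=
  match (PySem.Dict.mk rec).get? "DISPLAY_ORDER" with
  | none => 0
  | some s => (PySem.Int.ofStr? s).getD 0

-- str(rec.get("NAME") or "").casefold(); casefold ported as ASCII lower (exact on Dom)
def pvNameCF (rec : pvRec) : String :=
  PySem.Str.lower (((PySem.Dict.mk rec).get? "NAME").getD "")

-- A's 3-tuple sort key (country_rank, display_order, name), split for PySem.List.sorted2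
-- (Python tuple comparison = lexicographic, so (rank, order) as a Lex pair, then the name)
def pvItemK1 (it : pvItem) : Lex (Int × Int) := toLex (pvCountryRank it.1, pvDisplayOrderInt it.2)
def pvItemK2 (it : pvItem) : String := pvNameCF it.2

def group_by_nav_listing_py (by_country : List (String × List (List (String × String)))) : List (String × List (String × (List (String × String)))) :=
  -- first loop: groups.setdefault(nav_key, []) then bucket.append((folder_slug, rec)) per row
  let groups : PySem.Dict String (List pvItem) :=
    by_country.foldl
      (fun g p =>
        if p.2 = [] then g
        else p.2.foldl (fun g' rec => g'.modify (pvNavKeyD p.1) [] (fun b => b ++ [(p.1, rec)]))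
               (g.setdefault (pvNavKeyD p.1) []))
      (PySem.Dict.mk [])
  -- second loop: for k in list(groups): groups[k] = _sort_merged_items(groups[k])
  (groups.keys.foldl
      (fun g k => g.insert k (PySem.List.sorted2 (g.getD k []) pvItemK1 pvItemK2)) groups).items

-- ===== PORT B =====
-- Source B's composite key (rank, on, nm.casefold()) as a plain triple, compared by Python's
-- tuple '<' written out component by component
abbrev pvTriple := Int × Int × String
abbrev pvEntry := pvTriple × String × pvRec

def pvSortKeyB (folder : String) (rec : pvRec) : pvTriple :=
  (pvCountryRank folder, pvDisplayOrderInt rec, pvNameCF rec)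

def pvKeyLtB (a b : pvTriple) : Bool :=
  decide (a.1 < b.1) || (decide (a.1 = b.1) &&
    (decide (a.2.1 < b.2.1) || (decide (a.2.1 = b.2.1) && decide (a.2.2 < b.2.2))))

-- hand-written rightmost binary search of Source B: lo, hi = 0, len(bucket); while lo < hi: ...
-- ((lo+hi)//2 on nonnegative ints is Nat division, exact; bucket[mid] is always in range)
def pvInsPosLoop (b : List pvEntry) (k : pvTriple) (lo hi : Nat) : Nat :=
  if h : lo < hi then
    if pvKeyLtB k (PySem.List.pyGetD b (((lo + hi) / 2 : Nat) : Int) (k, "", [])).1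
    then pvInsPosLoop b k lo ((lo + hi) / 2)
    else pvInsPosLoop b k ((lo + hi) / 2 + 1) hi
  else lo
termination_by hi - lo
decreasing_by all_goals omega

def pvInsPos (b : List pvEntry) (k : pvTriple) : Nat := pvInsPosLoop b k 0 b.length

def group_by_nav_listing_py_alt (by_country : List (String × List (List (String × String)))) : List (String × List (String × (List (String × String)))) :=
  -- one pass: bucket = groups.setdefault(nav_key, []); per row, binary-search the rightmost
  -- insertion point for the key and bucket.insert(lo, (k, folder_slug, rec))
  -- (Source B computes nav_key / rank / the key tuple inline; pvNavKeyD / pvSortKeyB are those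
  -- exact computations)
  let groups : PySem.Dict String (List pvEntry) :=
    by_country.foldl
      (fun g p =>
        if p.2 = [] then g
        else p.2.foldl
               (fun g' rec =>
                 g'.modify (pvNavKeyD p.1) []
                   (fun b => PySem.List.insert b ((pvInsPos b (pvSortKeyB p.1 rec) : Nat) : Int)
                               (pvSortKeyB p.1 rec, p.1, rec)))
               (g.setdefault (pvNavKeyD p.1) []))
      (PySem.Dict.mk [])
  -- {nav: [(f, rec) for _, f, rec in b] for nav, b in groups.items()}
  groups.items.map (fun p => (p.1, p.2.map (fun t => (t.2.1, t.2.2))))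

-- ===== PRECONDITION & SPEC =====
-- Pre_ excludes (a) inputs on which A raises ValueError (a folder with nonempty rows that is neither
-- "international" nor mapped to a continent) and (b) association lists with duplicate folder keys or
-- duplicate keys inside a record, which cannot arise from Python dict arguments.
def Pre_group_by_nav_listing_py (by_country : List (String × List (List (String × String)))) : Prop :=
  (by_country.map (·.1)).Nodup ∧
  (∀ p ∈ by_country, ∀ rec ∈ p.2, (rec.map (·.1)).Nodup) ∧
  (∀ p ∈ by_country, p.2 ≠ [] →
    p.1 ∈ ["international", "china", "japan", "republic_of_korea", "united_states",
           "united_kingdom_and_europe", "germany", "australia", "canada"])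
instance (by_country : List (String × List (List (String × String)))) : Decidable (Pre_group_by_nav_listing_py by_country) := by unfold Pre_group_by_nav_listing_py; infer_instance

def pvWitness_group_by_nav_listing_py : (List (String × List (List (String × String)))) :=
  [("china", [[("NAME", "b"), ("DISPLAY_ORDER", "2")], [("NAME", "A")]]),
   ("japan", [[("NAME", "c")]]),
   ("mars", [])]

def Spec_group_by_nav_listing_py (by_country : List (String × List (List (String × String)))) (out : List (String × List (String × (List (String × String))))) : Prop := out = group_by_nav_listing_py_alt by_country
instance (by_country : List (String × List (List (String × String)))) (out : List (String × List (String × (List (String × String))))) : Decidable (Spec_group_by_nav_listing_py by_country out) := by unfold Spec_group_by_nav_listing_py; infer_instance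

-- ===== CLAIM (what is proved, stated in full; the proofs are below) =====
def Claim_equal_group_by_nav_listing_py : Prop := ∀ (by_country : List (String × List (List (String × String)))), Dom_group_by_nav_listing_py by_country → Pre_group_by_nav_listing_py by_country → Spec_group_by_nav_listing_py by_country (group_by_nav_listing_py by_country)

-- ===== LEMMAS AND PROOFS =====

theorem pvWitness_ok :
    Dom_group_by_nav_listing_py pvWitness_group_by_nav_listing_py ∧
    Pre_group_by_nav_listing_py pvWitness_group_by_nav_listing_py := by
  constructor <;> decide

-- proof-side view of the composite key: the lexicographic order on the triples
abbrev pvKey := Lex (Lex (Int × Int) × String)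
def pvEnc (t : pvTriple) : pvKey := toLex (toLex (t.1, t.2.1), t.2.2)
def pvItemKey (it : pvItem) : pvKey := pvEnc (pvSortKeyB it.1 it.2)

-- B's boolean tuple comparison is the strict lexicographic order on the encoded key
theorem pv_keyLt_eq (a b : pvTriple) : pvKeyLtB a b = decide (pvEnc a < pvEnc b) := by
  have h : pvEnc a < pvEnc b ↔
      (a.1 < b.1 ∨ (a.1 = b.1 ∧ (a.2.1 < b.2.1 ∨ (a.2.1 = b.2.1 ∧ a.2.2 < b.2.2)))) := by
    simp only [pvEnc, Prod.Lex.lt_iff, ofLex_toLex, toLex_inj, Prod.mk.injEq]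
    tauto
  by_cases h1 : a.1 < b.1 <;> by_cases h2 : a.1 = b.1 <;>
    by_cases h3 : a.2.1 < b.2.1 <;> by_cases h4 : a.2.1 = b.2.1 <;>
    by_cases h5 : a.2.2 < b.2.2 <;>
    simp [pvKeyLtB, h, h1, h2, h3, h4, h5]

-- sorted2 (a two-component tuple key) is sorted with the Lex-encoded key
theorem pv_sorted2_eq_sorted {α κ₁ κ₂ : Type} [LinearOrder κ₁] [LinearOrder κ₂]
    (xs : List α) (k1 : α → κ₁) (k2 : α → κ₂) :
    PySem.List.sorted2 xs k1 k2
      = PySem.List.sorted xs (fun x => (toLex (k1 x, k2 x) : Lex (κ₁ × κ₂))) := by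
  have hb : (fun a b => decide (k1 a < k1 b) || (!decide (k1 b < k1 a) && decide (k2 a < k2 b)))
      = (fun a b => decide ((toLex (k1 a, k2 a) : Lex (κ₁ × κ₂)) < toLex (k1 b, k2 b))) := by
    funext a b
    have h : ((toLex (k1 a, k2 a) : Lex (κ₁ × κ₂)) < toLex (k1 b, k2 b))
        ↔ (k1 a < k1 b ∨ (¬ k1 b < k1 a ∧ k2 a < k2 b)) := by
      simp only [Prod.Lex.lt_iff, ofLex_toLex]
      constructor
      · rintro (h1 | ⟨h1, h2⟩)
        · exact Or.inl h1
        · exact Or.inr ⟨by simp [h1], h2⟩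
      · rintro (h1 | ⟨h1, h2⟩)
        · exact Or.inl h1
        · rcases lt_trichotomy (k1 a) (k1 b) with hx | hx | hx
          · exact Or.inl hx
          · exact Or.inr ⟨hx, h2⟩
          · exact absurd hx h1
    by_cases h1 : k1 a < k1 b <;> by_cases h2 : k1 b < k1 a <;> by_cases h3 : k2 a < k2 b <;>
      simp [h, h1, h2, h3]
  rw [PySem.List.sorted_eq_foldl_insertBy]
  show xs.foldl (fun acc x => PySem.List.insertBy
      (fun a b => decide (k1 a < k1 b) || (!decide (k1 b < k1 a) && decide (k2 a < k2 b))) x acc) []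
    = _
  rw [hb]

-- setdefault k [] followed by a modify at k is just the modify
theorem pv_setdefault_modify {ν : Type} (g : PySem.Dict String ν) (k : String) (v0 : ν)
    (f : ν → ν) : (g.setdefault k v0).modify k v0 f = g.modify k v0 f := by
  by_cases hc : g.contains k = true
  · rw [PySem.Dict.setdefault_of_contains g v0 hc]
  · have hall : ∀ p ∈ g.items, ¬ (p.1 == k) = true := by
      intro p hp hpk
      exact hc (by simp only [PySem.Dict.contains, List.any_eq_true]; exact ⟨p, hp, hpk⟩)
    have hfind : g.items.find? (fun p => p.1 == k) = none := List.find?_eq_none.mpr hall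
    have hmap : ∀ w : ν, g.items.map
        (fun p => if (p.1 == k) = true then (k, w) else p) = g.items := by
      intro w
      rw [List.map_congr_left (g := id) (fun p hp => by simp [hall p hp]), List.map_id]
    have hcf : g.contains k = false := by simpa using hc
    have hfind2 : (g.items ++ [(k, v0)]).find? (fun p => p.1 == k) = some (k, v0) := by
      rw [List.find?_append, hfind]
      simp
    have hct2 : (PySem.Dict.mk (g.items ++ [(k, v0)]) : PySem.Dict String ν).contains k = true := by
      simp [PySem.Dict.contains]
    apply PySem.Dict.ext
    simp only [PySem.Dict.setdefault, hcf, Bool.false_eq_true, if_false, PySem.Dict.modify,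
      PySem.Dict.getD, PySem.Dict.get?, PySem.Dict.insert, hct2, if_true, hfind, hfind2,
      Option.map_some, Option.map_none, Option.getD_some, Option.getD_none, List.map_append]
    rw [hmap (f v0)]
    simp

-- the nested per-folder loop of both ports flattens to one fold over the (folder, rec) pairs
theorem pv_fold_flatten {ν : Type} (F : String → pvRec → List ν → List ν)
    (l : List (String × List pvRec)) (g : PySem.Dict String (List ν)) :
    l.foldl
      (fun g p =>
        if p.2 = [] then g
        else p.2.foldl (fun g' rec => g'.modify (pvNavKeyD p.1) [] (F p.1 rec))
               (g.setdefault (pvNavKeyD p.1) []))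
      g
    = (l.flatMap (fun p => p.2.map (fun r => (p.1, r)))).foldl
        (fun g q => g.modify (pvNavKeyD q.1) [] (F q.1 q.2)) g := by
  induction l generalizing g with
  | nil => rfl
  | cons p t ih =>
    simp only [List.foldl_cons, List.flatMap_cons, List.foldl_append]
    by_cases hp : p.2 = []
    · simp only [hp, if_pos, List.map_nil, List.foldl_nil]
      exact ih g
    · rw [if_neg hp, ih]
      congr 1
      rw [List.foldl_map]
      obtain ⟨r, rs, hrr⟩ := List.exists_cons_of_ne_nil hp
      rw [hrr]
      simp only [List.foldl_cons]
      rw [pv_setdefault_modify]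

-- getD through a fold of modifies: only the entries whose key hits c matter, in order
theorem pv_getd_modify_fold {κ β ν : Type} [BEq κ] [LawfulBEq κ] [DecidableEq κ]
    (l : List β) (key : β → κ) (f : β → ν → ν) (d : PySem.Dict κ ν) (c : κ) (d0 : ν) :
    (l.foldl (fun d x => d.modify (key x) d0 (f x)) d).getD c d0
    = (l.filter (fun x => key x == c)).foldl (fun a x => f x a) (d.getD c d0) := by
  induction l generalizing d with
  | nil => rfl
  | cons x t ih =>
    simp only [List.foldl_cons, List.filter_cons]
    rw [ih]
    by_cases hx : key x = c
    · simp only [hx, beq_self_eq_true, if_true, List.foldl_cons]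
      congr 1
      simp [PySem.Dict.modify]
    · have hxb : (key x == c) = false := by simp [hx]
      simp only [hxb, Bool.false_eq_true, if_false]
      congr 1
      have hcx : ¬ c = key x := fun h => hx h.symm
      simp [PySem.Dict.modify, PySem.Dict.getD_insert, hcx]

-- getD through A's second loop (insert of a function of the old value, over Nodup keys)
theorem pv_getd_insert_fold {κ ν : Type} [BEq κ] [LawfulBEq κ] [DecidableEq κ]
    (F : ν → ν) (d0 : ν) (ks : List κ) (hnd : ks.Nodup) (g : PySem.Dict κ ν) (c : κ) :
    (ks.foldl (fun g k => g.insert k (F (g.getD k d0))) g).getD c d0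
    = if c ∈ ks then F (g.getD c d0) else g.getD c d0 := by
  induction ks generalizing g with
  | nil => simp
  | cons a t ih =>
    simp only [List.foldl_cons]
    rw [ih (List.Nodup.of_cons hnd)]
    have hna : a ∉ t := (List.nodup_cons.mp hnd).1
    by_cases hct : c ∈ t
    · have hca : c ≠ a := fun h => hna (h ▸ hct)
      simp [hct, hca, PySem.Dict.getD_insert, List.mem_cons]
    · by_cases hca : c = a
      · subst hca
        simp [hct, List.mem_cons]
      · simp [hct, hca, PySem.Dict.getD_insert, List.mem_cons]

-- updating a set with its own members changes nothing
theorem pv_set_update_self {κ : Type} [BEq κ] [LawfulBEq κ] (s : List κ) (l : List κ)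
    (h : ∀ x ∈ l, x ∈ s) : PySem.Set.update s l = s := by
  simp only [PySem.Set.update]
  induction l with
  | nil => rfl
  | cons x t ih =>
    simp only [List.foldl_cons]
    rw [PySem.Set.add_of_mem (h x (by simp))]
    exact ih (fun y hy => h y (by simp [hy]))

-- the binary-search loop returns the rightmost insertion position
theorem pv_insPosLoop_spec (b : List pvEntry) (k : pvTriple)
    (hs : (b.map (fun t => pvEnc t.1)).Pairwise (· ≤ ·)) :
    ∀ fuel lo hi, hi - lo ≤ fuel → lo ≤ hi → hi ≤ b.length →
    (∀ i (h : i < b.length), i < lo → ¬ pvEnc k < pvEnc b[i].1) →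
    (∀ i (h : i < b.length), hi ≤ i → pvEnc k < pvEnc b[i].1) →
    lo ≤ pvInsPosLoop b k lo hi ∧ pvInsPosLoop b k lo hi ≤ hi ∧
    (∀ i (h : i < b.length), i < pvInsPosLoop b k lo hi → ¬ pvEnc k < pvEnc b[i].1) ∧
    (∀ i (h : i < b.length), pvInsPosLoop b k lo hi ≤ i → pvEnc k < pvEnc b[i].1) := by
  have hmono : ∀ i j (hi : i < b.length) (hj : j < b.length), i ≤ j →
      pvEnc b[i].1 ≤ pvEnc b[j].1 := by
    intro i j hi hj hij
    rcases Nat.eq_or_lt_of_le hij with h | h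
    · subst h; exact le_refl _
    · have := (List.pairwise_iff_getElem.mp hs) i j (by simpa using hi) (by simpa using hj) h
      simpa using this
  intro fuel
  induction fuel with
  | zero =>
    intro lo hi hf hlh hhb h1 h2
    have heq : hi = lo := by omega
    subst heq
    rw [pvInsPosLoop, dif_neg (lt_irrefl _)]
    exact ⟨le_refl _, le_refl _, h1, h2⟩
  | succ n ihf =>
    intro lo hi hf hlh hhb h1 h2
    rw [pvInsPosLoop]
    by_cases h : lo < hi
    · rw [dif_pos h]
      have hm1 : (lo + hi) / 2 < hi := by omega
      have hm0 : lo ≤ (lo + hi) / 2 := by omega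
      have hmb : (lo + hi) / 2 < b.length := by omega
      rw [PySem.List.pyGetD_natCast, List.getD_eq_getElem _ _ hmb, pv_keyLt_eq]
      by_cases hk : pvEnc k < pvEnc b[(lo + hi) / 2].1
      · rw [if_pos (decide_eq_true hk)]
        obtain ⟨ha, hb2, hc2, hd2⟩ := ihf lo ((lo + hi) / 2) (by omega) hm0 (by omega) h1
          (fun i hib hmi => lt_of_lt_of_le hk (hmono _ _ hmb hib hmi))
        exact ⟨ha, by omega, hc2, hd2⟩
      · rw [if_neg (by simpa using hk)]
        obtain ⟨ha, hb2, hc2, hd2⟩ := ihf ((lo + hi) / 2 + 1) hi (by omega) (by omega) hhb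
          (fun i hib him =>
            not_lt.mpr (le_trans (hmono i _ hib hmb (by omega)) (not_lt.mp hk)))
          h2
        exact ⟨by omega, hb2, hc2, hd2⟩
    · rw [dif_neg h]
      have heq : lo = hi := by omega
      exact ⟨le_refl _, le_of_eq heq, h1, fun i hib hli => h2 i hib (heq ▸ hli)⟩

-- insertBy with a strict key comparison inserts at the rightmost position among equals
theorem pv_insertBy_eq_take_drop {α κ : Type} [LinearOrder κ] (key : α → κ) (q : α) :
    ∀ (acc : List α) (r : Nat), r ≤ acc.length →
    (∀ i (h : i < acc.length), i < r → ¬ key q < key acc[i]) →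
    (∀ h : r < acc.length, key q < key acc[r]) →
    PySem.List.insertBy (fun a b => decide (key a < key b)) q acc
      = acc.take r ++ q :: acc.drop r := by
  intro acc
  induction acc with
  | nil =>
    intro r hr h1 h2
    have : r = 0 := Nat.le_zero.mp hr
    subst this
    simp [PySem.List.insertBy]
  | cons a t ih =>
    intro r hr h1 h2
    by_cases hqa : key q < key a
    · have hr0 : r = 0 := by
        by_contra h0
        exact h1 0 (by simp) (Nat.pos_of_ne_zero h0) hqa
      subst hr0
      simp [PySem.List.insertBy, hqa]
    · have hr0 : r ≠ 0 := by
        intro h0; subst h0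
        exact hqa (by simpa using h2 (by simp))
      obtain ⟨s, rfl⟩ := Nat.exists_eq_succ_of_ne_zero hr0
      have hstep : PySem.List.insertBy (fun a b => decide (key a < key b)) q (a :: t)
          = a :: PySem.List.insertBy (fun a b => decide (key a < key b)) q t := by
        simp [PySem.List.insertBy, hqa]
      rw [hstep, ih s (by simpa using hr)
        (fun i hi his => by simpa using h1 (i + 1) (by simpa using hi) (by omega))
        (fun hsl => by simpa using h2 (by simpa using hsl))]
      simp

-- B's per-bucket fold (binary insert per element) is the stable sort of the bucket, decorated
theorem pv_bucket_fold (qs ws : List pvItem) :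
    qs.foldl
      (fun b q => PySem.List.insert b ((pvInsPos b (pvSortKeyB q.1 q.2) : Nat) : Int)
                    (pvSortKeyB q.1 q.2, q.1, q.2))
      ((PySem.List.sorted ws pvItemKey).map (fun q => (pvSortKeyB q.1 q.2, q)))
    = (PySem.List.sorted (ws ++ qs) pvItemKey).map (fun q => (pvSortKeyB q.1 q.2, q)) := by
  induction qs generalizing ws with
  | nil => simp
  | cons q t ih =>
    simp only [List.foldl_cons]
    have hstep : PySem.List.insert
        ((PySem.List.sorted ws pvItemKey).map (fun q => (pvSortKeyB q.1 q.2, q)))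
        ((pvInsPos ((PySem.List.sorted ws pvItemKey).map (fun q => (pvSortKeyB q.1 q.2, q)))
           (pvSortKeyB q.1 q.2) : Nat) : Int)
        (pvSortKeyB q.1 q.2, q.1, q.2)
        = (PySem.List.sorted (ws ++ [q]) pvItemKey).map (fun q => (pvSortKeyB q.1 q.2, q)) := by
      set acc := PySem.List.sorted ws pvItemKey with hacc
      set b := acc.map (fun q => (pvSortKeyB q.1 q.2, q)) with hb
      have hlen : b.length = acc.length := by simp [hb]
      have hsort : (b.map (fun t => pvEnc t.1)).Pairwise (· ≤ ·) := by
        rw [hb, List.map_map]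
        exact (List.pairwise_map).mpr (by simpa using PySem.List.sorted_pairwise ws pvItemKey)
      obtain ⟨h0, hle, hA, hB⟩ := pv_insPosLoop_spec b (pvSortKeyB q.1 q.2) hsort b.length
        0 b.length (by omega) (by omega) (le_refl _)
        (fun i hib hi0 => absurd hi0 (Nat.not_lt_zero i))
        (fun i hib hli => absurd hib (by omega))
      have hIB : PySem.List.insertBy (fun a b => decide (pvItemKey a < pvItemKey b)) q acc
          = acc.take (pvInsPos b (pvSortKeyB q.1 q.2))
              ++ q :: acc.drop (pvInsPos b (pvSortKeyB q.1 q.2)) := by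
        apply pv_insertBy_eq_take_drop pvItemKey q acc (pvInsPos b (pvSortKeyB q.1 q.2))
          (by rw [← hlen]; exact hle)
        · intro i hi hir
          have := hA i (by omega) hir
          simpa [hb] using this
        · intro hrl
          have := hB (pvInsPos b (pvSortKeyB q.1 q.2)) (by omega) (le_refl _)
          simpa [hb] using this
      have hins : PySem.List.insert b ((pvInsPos b (pvSortKeyB q.1 q.2) : Nat) : Int)
            (pvSortKeyB q.1 q.2, q.1, q.2)
          = b.take (pvInsPos b (pvSortKeyB q.1 q.2))
              ++ (pvSortKeyB q.1 q.2, q.1, q.2) :: b.drop (pvInsPos b (pvSortKeyB q.1 q.2)) :=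
        PySem.List.insert_natCast b _ _ hle
      have hsortapp : PySem.List.sorted (ws ++ [q]) pvItemKey
          = acc.take (pvInsPos b (pvSortKeyB q.1 q.2))
              ++ q :: acc.drop (pvInsPos b (pvSortKeyB q.1 q.2)) := by
        rw [PySem.List.sorted_eq_foldl_insertBy, List.foldl_append]
        simp only [List.foldl_cons, List.foldl_nil]
        rw [← PySem.List.sorted_eq_foldl_insertBy]
        exact hIB
      rw [hins, hsortapp]
      simp [hb, List.map_take, List.map_drop]
    rw [hstep, ih (ws ++ [q])]
    simp

-- ===== VERDICT (by name: the statement is the Claim_ definition above) =====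
theorem group_by_nav_listing_py_spec : Claim_equal_group_by_nav_listing_py := by
  intro bc _hd hpre
  unfold Spec_group_by_nav_listing_py
  simp only [group_by_nav_listing_py, group_by_nav_listing_py_alt]
  have hfa := pv_fold_flatten (F := fun s r b => b ++ [(s, r)]) bc
    (PySem.Dict.mk ([] : List (String × List pvItem)))
  have hfb := pv_fold_flatten
    (F := fun s r b => PySem.List.insert b ((pvInsPos b (pvSortKeyB s r) : Nat) : Int)
            (pvSortKeyB s r, s, r)) bc
    (PySem.Dict.mk ([] : List (String × List pvEntry)))
  simp only [] at hfa hfb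
  rw [hfa, hfb]
  set pairs := bc.flatMap (fun p => p.2.map (fun r => (p.1, r))) with hpairs
  set GA := pairs.foldl
      (fun g q => g.modify (pvNavKeyD q.1) [] (fun b => b ++ [(q.1, q.2)]))
      (PySem.Dict.mk ([] : List (String × List pvItem))) with hGA
  set GB := pairs.foldl
      (fun g q => g.modify (pvNavKeyD q.1) []
        (fun b => PySem.List.insert b ((pvInsPos b (pvSortKeyB q.1 q.2) : Nat) : Int)
                    (pvSortKeyB q.1 q.2, q.1, q.2)))
      (PySem.Dict.mk ([] : List (String × List pvEntry))) with hGB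
  set KS := PySem.Set.ofList (pairs.map (fun q => pvNavKeyD q.1)) with hKS
  have hndKS : KS.Nodup := PySem.Set.nodup_ofList _
  have hkA : GA.keys = KS := by
    have := PySem.Dict.keys_foldl_modify_key pairs (fun q => pvNavKeyD q.1)
      ([] : List pvItem) (fun _ q => fun b => b ++ [(q.1, q.2)])
      (PySem.Dict.mk ([] : List (String × List pvItem)))
    simp only [] at this
    rw [hGA, this, hKS, PySem.Set.ofList_eq_foldl]
    rfl
  have hkB : GB.keys = KS := by
    have := PySem.Dict.keys_foldl_modify_key pairs (fun q => pvNavKeyD q.1)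
      ([] : List pvEntry)
      (fun _ q => fun b => PySem.List.insert b ((pvInsPos b (pvSortKeyB q.1 q.2) : Nat) : Int)
                    (pvSortKeyB q.1 q.2, q.1, q.2))
      (PySem.Dict.mk ([] : List (String × List pvEntry)))
    simp only [] at this
    rw [hGB, this, hKS, PySem.Set.ofList_eq_foldl]
    rfl
  rw [hkA]
  have hkA2 : (KS.foldl
      (fun g k => g.insert k (PySem.List.sorted2 (g.getD k []) pvItemK1 pvItemK2)) GA).keys
      = KS := by
    have := PySem.Dict.keys_foldl_insert KS
      (fun g k => PySem.List.sorted2 (g.getD k []) pvItemK1 pvItemK2) GA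
    simp only [] at this
    rw [this, hkA]
    exact pv_set_update_self KS KS (fun x hx => hx)
  have hndA2 : (KS.foldl
      (fun g k => g.insert k (PySem.List.sorted2 (g.getD k []) pvItemK1 pvItemK2)) GA).keys.Nodup := by
    rw [hkA2]; exact hndKS
  have hndB : GB.keys.Nodup := by rw [hkB]; exact hndKS
  rw [PySem.Dict.items_eq_map_keys _ hndA2 ([] : List pvItem), hkA2]
  rw [PySem.Dict.items_eq_map_keys GB hndB ([] : List pvEntry), hkB]
  rw [List.map_map]
  apply List.map_congr_left
  intro c hc
  simp only [Function.comp]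
  have hgi := pv_getd_insert_fold (fun v => PySem.List.sorted2 v pvItemK1 pvItemK2)
    ([] : List pvItem) KS hndKS GA c
  simp only [] at hgi
  rw [hgi, if_pos hc]
  have hbA : GA.getD c [] = pairs.filter (fun q => pvNavKeyD q.1 == c) := by
    have := pv_getd_modify_fold pairs (fun q => pvNavKeyD q.1)
      (fun q => fun b => b ++ [(q.1, q.2)])
      (PySem.Dict.mk ([] : List (String × List pvItem))) c ([] : List pvItem)
    simp only [] at this
    rw [hGA, this]
    rw [show ((PySem.Dict.mk ([] : List (String × List pvItem))).getD c []) = [] from rfl]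
    rw [show (fun (a : List pvItem) (q : pvItem) => a ++ [(q.1, q.2)])
          = (fun (a : List pvItem) (q : pvItem) => a ++ [q]) from rfl]
    rw [PySem.List.foldl_append_singleton_eq_self]
    simp
  have hbB : GB.getD c []
      = (PySem.List.sorted (pairs.filter (fun q => pvNavKeyD q.1 == c)) pvItemKey).map
          (fun q => (pvSortKeyB q.1 q.2, q)) := by
    have := pv_getd_modify_fold pairs (fun q => pvNavKeyD q.1)
      (fun q => fun b => PySem.List.insert b ((pvInsPos b (pvSortKeyB q.1 q.2) : Nat) : Int)
                    (pvSortKeyB q.1 q.2, q.1, q.2))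
      (PySem.Dict.mk ([] : List (String × List pvEntry))) c ([] : List pvEntry)
    simp only [] at this
    rw [hGB, this]
    rw [show ((PySem.Dict.mk ([] : List (String × List pvEntry))).getD c []) = [] from rfl]
    have hb0 := pv_bucket_fold (pairs.filter (fun q => pvNavKeyD q.1 == c)) []
    rw [show ((PySem.List.sorted ([] : List pvItem) pvItemKey).map
          (fun q => (pvSortKeyB q.1 q.2, q))) = ([] : List pvEntry) from rfl] at hb0
    simp only [List.nil_append] at hb0
    exact hb0
  rw [hbA, hbB, List.map_map]
  rw [pv_sorted2_eq_sorted]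
  rw [show (fun (it : pvItem) => (toLex (pvItemK1 it, pvItemK2 it) : pvKey)) = pvItemKey from rfl]
  rw [show ((fun t : pvEntry => t.2) ∘ fun q : pvItem => (pvSortKeyB q.1 q.2, q))
        = (fun q : pvItem => q) from rfl]
  simp
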